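-- pv_equiv track=rewrite | github.com/imazen/zentrain-corpus | tools/behavioral_cluster.py | cluster_within_sc
-- ===== SOURCE A (Python) =====
-- from collections import defaultdict
--
-- def hamming(a, b):
--     return sum(1 for x, y in zip(a, b) if x != y and x != -1 and y != -1)
--
-- def cluster_within_sc(sigs: dict, thresh: int):
--     by_sc = defaultdict(list)
--     for k, s in sigs.items():
--         by_sc[k[1]].append((k, s))
--     clusters = []
--     for sc, items in by_sc.items():
--         used = [False] * len(items)
--         for i in range(len(items)):
--             if used[i]:
--                 continue
--             grp = {items[i][0]}
--             used[i] = True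
--             sig_i = items[i][1]
--             for j in range(i + 1, len(items)):
--                 if used[j]:
--                     continue
--                 if hamming(sig_i, items[j][1]) <= thresh:
--                     grp.add(items[j][0])
--                     used[j] = True
--             clusters.append(grp)
--     return clusters
-- ===== SOURCE B (Python) =====
-- def hamming(a, b):
--     return sum(1 for x, y in zip(a, b) if x != y and x != -1 and y != -1)
--
-- def cluster_within_sc(sigs: dict, thresh: int):
--     by_sc = {}
--     for k, s in sigs.items():
--         by_sc.setdefault(k[1], []).append((k, s))
--     clusters = []
--     for items in by_sc.values():
--         remaining = list(items)
--         while remaining: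
--             (seed_key, seed_sig), rest = remaining[0], remaining[1:]
--             absorbed, leftover = [], []
--             for key, s in rest:
--                 (absorbed if hamming(seed_sig, s) <= thresh else leftover).append((key, s))
--             clusters.append({seed_key} | {key for key, _ in absorbed})
--             remaining = leftover
--     return clusters
-- ===== Notes on version B (the rewrite author's own statement) =====
-- stated objective: alternative
-- what changed: Replaces A's fixed-length `used` boolean array with its index-based outer scan and skip-over-marked inner scan by a shrinking worklist: pop the head as seed, partition the remaining items once into absorbed and leftover, recurse on the leftover.
import Mathlib
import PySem

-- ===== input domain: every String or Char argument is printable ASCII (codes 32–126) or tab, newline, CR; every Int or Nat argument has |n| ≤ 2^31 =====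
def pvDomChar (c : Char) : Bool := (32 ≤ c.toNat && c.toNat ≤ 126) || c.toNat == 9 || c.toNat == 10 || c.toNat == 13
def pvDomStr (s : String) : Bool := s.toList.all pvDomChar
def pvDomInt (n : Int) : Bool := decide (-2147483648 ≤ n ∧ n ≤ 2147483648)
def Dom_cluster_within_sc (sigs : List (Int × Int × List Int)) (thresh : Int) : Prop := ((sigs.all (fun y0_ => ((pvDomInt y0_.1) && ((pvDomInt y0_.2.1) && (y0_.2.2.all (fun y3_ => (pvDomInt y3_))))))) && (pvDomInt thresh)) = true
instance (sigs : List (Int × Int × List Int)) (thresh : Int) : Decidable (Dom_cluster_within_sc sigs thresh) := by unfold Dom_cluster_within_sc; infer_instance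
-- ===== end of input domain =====

-- B replaces A's `used` boolean array and fixed-index double scan by a shrinking
-- worklist: pop the head as seed, partition the rest once into absorbed/leftover,
-- recurse on the leftover (objective: alternative decomposition, same cost).

-- ===== PORT A =====
-- sum(1 for x, y in zip(a, b) if x != y and x != -1 and y != -1)
def hamming (a b : List Int) : Int :=
  (a.zip b).foldl
    (fun acc xy => if xy.1 ≠ xy.2 ∧ xy.1 ≠ -1 ∧ xy.2 ≠ -1 then acc + 1 else acc) 0

-- by_sc = defaultdict(list); for k, s in sigs.items(): by_sc[k[1]].append((k, s))
def groupBySC (sigs : List (Int × Int × List Int)) :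
    PySem.Dict Int (List ((Int × Int) × List Int)) :=
  sigs.foldl
    (fun d y => d.modify y.2.1 [] (fun l => l ++ [((y.1, y.2.1), y.2.2)]))
    PySem.Dict.empty

-- inner loop: for j in range(i+1, len(items)): … (indices are always in range,
-- so used[j] is read with getD and written with List.set)
def innerScanA (items : List ((Int × Int) × List Int)) (thresh : Int)
    (sig_i : List Int) (grp : PySem.Set (Int × Int)) (used : List Bool) (j : Nat) :
    PySem.Set (Int × Int) × List Bool :=
  if h : j < items.length then
    if used.getD j false then
      innerScanA items thresh sig_i grp used (j + 1)
    else if hamming sig_i items[j].2 ≤ thresh then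
      innerScanA items thresh sig_i (grp.add items[j].1) (used.set j true) (j + 1)
    else
      innerScanA items thresh sig_i grp used (j + 1)
  else (grp, used)
termination_by items.length - j

-- outer loop: for i in range(len(items)): …
def outerA (items : List ((Int × Int) × List Int)) (thresh : Int)
    (used : List Bool) (i : Nat) : List (List (Int × Int)) :=
  if h : i < items.length then
    if used.getD i false then
      outerA items thresh used (i + 1)
    else
      let grp : PySem.Set (Int × Int) := PySem.Set.ofList [items[i].1]
      let used1 := used.set i true
      let r := innerScanA items thresh items[i].2 grp used1 (i + 1)
      r.1 :: outerA items thresh r.2 (i + 1)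
  else []
termination_by items.length - i

def cluster_within_sc (sigs : List (Int × Int × List Int)) (thresh : Int) :
    List (List (Int × Int)) :=
  (groupBySC sigs).items.foldl
    (fun clusters it =>
      clusters ++ outerA it.2 thresh (List.replicate it.2.length false) 0) []

-- ===== PORT B =====
-- pop the head as seed, partition the rest into absorbed/leftover, recurse on leftover
def worklistB (thresh : Int) (remaining : List ((Int × Int) × List Int)) :
    List (List (Int × Int)) :=
  match remaining with
  | [] => []
  | (k, s) :: rest =>
    let p := rest.partition (fun it => hamming s it.2 ≤ thresh)
    PySem.Set.ofList (k :: p.1.map (·.1)) :: worklistB thresh p.2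
termination_by remaining.length
decreasing_by
  simp only [List.partition_eq_filter_filter]
  exact Nat.lt_succ_of_le (List.length_filter_le _ _)

def cluster_within_sc_alt (sigs : List (Int × Int × List Int)) (thresh : Int) :
    List (List (Int × Int)) :=
  (groupBySC sigs).items.foldl
    (fun clusters it => clusters ++ worklistB thresh it.2) []

-- ===== PRECONDITION & SPEC =====
def Spec_cluster_within_sc (sigs : List (Int × Int × List Int)) (thresh : Int) (out : List (List (Int × Int))) : Prop := out = cluster_within_sc_alt sigs thresh
instance (sigs : List (Int × Int × List Int)) (thresh : Int) (out : List (List (Int × Int))) : Decidable (Spec_cluster_within_sc sigs thresh out) := by unfold Spec_cluster_within_sc; infer_instance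

-- ===== CLAIM (what is proved, stated in full; the proofs are below) =====
def Claim_equal_cluster_within_sc : Prop := ∀ (sigs : List (Int × Int × List Int)) (thresh : Int), Dom_cluster_within_sc sigs thresh → Spec_cluster_within_sc sigs thresh (cluster_within_sc sigs thresh)

-- ===== LEMMAS AND PROOFS =====

-- the items at indices ≥ i whose `used` flag is false, in order
def sel (items : List ((Int × Int) × List Int)) (used : List Bool) (i : Nat) :
    List ((Int × Int) × List Int) :=
  ((items.zip used).drop i).filterMap (fun p => if p.2 then none else some p.1)

theorem sel_of_ge (items : List ((Int × Int) × List Int)) (used : List Bool)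
    (i : Nat) (h : items.length ≤ i) : sel items used i = [] := by
  unfold sel
  rw [List.drop_eq_nil_of_le]
  · rfl
  · simp only [List.length_zip]
    omega

theorem sel_cons (items : List ((Int × Int) × List Int)) (used : List Bool)
    (i : Nat) (hi : i < items.length) (hlen : used.length = items.length) :
    sel items used i =
      (if used[i]'(by omega) then [] else [items[i]]) ++ sel items used (i + 1) := by
  unfold sel
  rw [List.drop_eq_getElem_cons (l := items.zip used)
    (by simp only [List.length_zip]; omega)]
  by_cases hu : used[i]'(by omega) = true <;>
    simp [List.getElem_zip, hu]

theorem sel_set_of_lt (items : List ((Int × Int) × List Int)) (used : List Bool)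
    (i j : Nat) (b : Bool) (h : j < i) :
    sel items (used.set j b) i = sel items used i := by
  unfold sel
  congr 1
  apply List.ext_getElem
  · simp
  · intro n h1 h2
    simp only [List.getElem_drop, List.getElem_zip, List.getElem_set]
    have : j ≠ i + n := by omega
    simp [this]

-- inner-loop invariant: innerScanA folds the absorbed items into grp, and the
-- resulting used list selects exactly the leftover from j on, leaving flags
-- below j untouched
theorem innerScanA_spec (items : List ((Int × Int) × List Int)) (thresh : Int)
    (s : List Int) :
    ∀ (fuel : Nat) (j : Nat) grp (used : List Bool), items.length ≤ j + fuel →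
      used.length = items.length →
      (innerScanA items thresh s grp used j).1 =
          ((sel items used j).filter (fun it => hamming s it.2 ≤ thresh)).foldl
            (fun g it => PySem.Set.add g it.1) grp ∧
      sel items (innerScanA items thresh s grp used j).2 j =
          (sel items used j).filter (fun it => ¬ hamming s it.2 ≤ thresh) ∧
      (innerScanA items thresh s grp used j).2.length = used.length ∧
      (∀ m, m < j → (innerScanA items thresh s grp used j).2.getD m false =
          used.getD m false) := by
  intro fuel
  induction fuel with
  | zero =>
    intro j grp used hf hlen
    have h : ¬ j < items.length := by omega
    have heq : innerScanA items thresh s grp used j = (grp, used) := by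
      rw [innerScanA, dif_neg h]
    have hsel : sel items used j = [] := sel_of_ge items used j (by omega)
    rw [heq, hsel]
    exact ⟨rfl, by simp, rfl, fun m _ => rfl⟩
  | succ f IH =>
    intro j grp used hf hlen
    by_cases h : j < items.length
    · have hj : j < used.length := by omega
      have hgd : used.getD j false = used[j]'hj := by
        simp [List.getD, List.getElem?_eq_getElem hj]
      rcases hu : used[j]'hj with _ | _
      · -- used[j] = false
        by_cases hh : hamming s items[j].2 ≤ thresh
        · -- absorbed
          have heq : innerScanA items thresh s grp used j =
              innerScanA items thresh s (grp.add items[j].1) (used.set j true) (j + 1) := by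
            rw [innerScanA, dif_pos h, hgd, hu]
            simp only [Bool.false_eq_true, if_false]
            rw [if_pos hh]
          have hlen' : (used.set j true).length = items.length := by simp [hlen]
          obtain ⟨c1, c2, c3, c4⟩ :=
            IH (j + 1) (grp.add items[j].1) (used.set j true) (by omega) hlen'
          have hsel : sel items used j = items[j] :: sel items used (j + 1) := by
            rw [sel_cons items used j h hlen]; simp [hu]
          have hsel' : sel items (used.set j true) (j + 1) = sel items used (j + 1) :=
            sel_set_of_lt items used (j + 1) j true (Nat.lt_succ_self j)
          refine ⟨?_, ?_, ?_, ?_⟩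
          · rw [heq, c1, hsel, hsel', List.filter_cons]
            simp [hh]
          · rw [heq]
            have hresl : (innerScanA items thresh s (grp.add items[j].1)
                (used.set j true) (j + 1)).2.length = items.length := by
              rw [c3]; exact hlen'
            have hjr : j < (innerScanA items thresh s (grp.add items[j].1)
                (used.set j true) (j + 1)).2.length := by omega
            have hresj : (innerScanA items thresh s (grp.add items[j].1)
                (used.set j true) (j + 1)).2[j]'hjr = true := by
              have h4 := c4 j (Nat.lt_succ_self j)
              rw [List.getD, List.getElem?_eq_getElem hjr] at h4
              have : (used.set j true).getD j false = true := by
                simp [List.getD, hj]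
              rw [this] at h4
              simpa using h4
            rw [sel_cons items _ j h hresl, hresj]
            simp only [if_true, List.nil_append]
            rw [c2, hsel', hsel, List.filter_cons]
            simp [hh]
          · rw [heq, c3]; simp [hlen]
          · intro m hm
            rw [heq, c4 m (by omega)]
            have hne : j ≠ m := by omega
            simp [List.getD, hne]
        · -- not absorbed
          have heq : innerScanA items thresh s grp used j =
              innerScanA items thresh s grp used (j + 1) := by
            rw [innerScanA, dif_pos h, hgd, hu]
            simp only [Bool.false_eq_true, if_false]
            rw [if_neg hh]
          obtain ⟨c1, c2, c3, c4⟩ := IH (j + 1) grp used (by omega) hlen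
          have hsel : sel items used j = items[j] :: sel items used (j + 1) := by
            rw [sel_cons items used j h hlen]; simp [hu]
          refine ⟨?_, ?_, ?_, ?_⟩
          · rw [heq, c1, hsel, List.filter_cons]; simp [hh]
          · rw [heq]
            have hresl : (innerScanA items thresh s grp used (j + 1)).2.length =
                items.length := by rw [c3, hlen]
            have hjr : j < (innerScanA items thresh s grp used (j + 1)).2.length := by
              omega
            have hresj : (innerScanA items thresh s grp used (j + 1)).2[j]'hjr = false := by
              have h4 := c4 j (Nat.lt_succ_self j)
              rw [List.getD, List.getElem?_eq_getElem hjr] at h4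
              rw [hgd, hu] at h4
              simpa using h4
            rw [sel_cons items _ j h hresl, hresj]
            simp only [Bool.false_eq_true, if_false, List.singleton_append]
            rw [c2, hsel, List.filter_cons]
            simp [hh]
          · rw [heq, c3]
          · intro m hm
            rw [heq, c4 m (by omega)]
      · -- used[j] = true
        have heq : innerScanA items thresh s grp used j =
            innerScanA items thresh s grp used (j + 1) := by
          rw [innerScanA, dif_pos h, hgd, hu]
          simp
        obtain ⟨c1, c2, c3, c4⟩ := IH (j + 1) grp used (by omega) hlen
        have hsel : sel items used j = sel items used (j + 1) := by
          rw [sel_cons items used j h hlen]; simp [hu]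
        refine ⟨?_, ?_, ?_, ?_⟩
        · rw [heq, c1, hsel]
        · rw [heq]
          have hresl : (innerScanA items thresh s grp used (j + 1)).2.length =
              items.length := by rw [c3, hlen]
          have hjr : j < (innerScanA items thresh s grp used (j + 1)).2.length := by omega
          have hresj : (innerScanA items thresh s grp used (j + 1)).2[j]'hjr = true := by
            have h4 := c4 j (Nat.lt_succ_self j)
            rw [List.getD, List.getElem?_eq_getElem hjr] at h4
            rw [hgd, hu] at h4
            simpa using h4
          rw [sel_cons items _ j h hresl, hresj]
          simp [c2, hsel]
        · rw [heq, c3]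
        · intro m hm
          rw [heq, c4 m (by omega)]
    · -- j ≥ length: both sides trivial
      have heq : innerScanA items thresh s grp used j = (grp, used) := by
        rw [innerScanA, dif_neg h]
      have hsel : sel items used j = [] := sel_of_ge items used j (by omega)
      rw [heq, hsel]
      exact ⟨rfl, by simp, rfl, fun m _ => rfl⟩

theorem outerA_eq_worklistB (items : List ((Int × Int) × List Int)) (thresh : Int) :
    ∀ (fuel : Nat) (i : Nat) (used : List Bool), items.length ≤ i + fuel →
      used.length = items.length →
      outerA items thresh used i = worklistB thresh (sel items used i) := by
  intro fuel
  induction fuel with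
  | zero =>
    intro i used hf hlen
    have h : ¬ i < items.length := by omega
    rw [sel_of_ge items used i (by omega), outerA, dif_neg h, worklistB]
  | succ f IH =>
    intro i used hf hlen
    by_cases h : i < items.length
    · have hi : i < used.length := by omega
      have hgd : used.getD i false = used[i]'hi := by
        simp [List.getD, List.getElem?_eq_getElem hi]
      rcases hu : used[i]'hi with _ | _
      · -- seed at i
        have hsel : sel items used i = items[i] :: sel items used (i + 1) := by
          rw [sel_cons items used i h hlen]; simp [hu]
        have hlen1 : (used.set i true).length = items.length := by simp [hlen]
        obtain ⟨c1, c2, c3, c4⟩ :=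
          innerScanA_spec items thresh items[i].2 f (i + 1)
            (PySem.Set.ofList [items[i].1]) (used.set i true) (by omega) hlen1
        have hsel1 : sel items (used.set i true) (i + 1) = sel items used (i + 1) :=
          sel_set_of_lt items used (i + 1) i true (Nat.lt_succ_self i)
        have heq : outerA items thresh used i =
            (innerScanA items thresh items[i].2 (PySem.Set.ofList [items[i].1])
              (used.set i true) (i + 1)).1 ::
            outerA items thresh
              (innerScanA items thresh items[i].2 (PySem.Set.ofList [items[i].1])
                (used.set i true) (i + 1)).2 (i + 1) := by
          rw [outerA, dif_pos h, hgd, hu]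
          simp only [Bool.false_eq_true, if_false]
        rw [heq, hsel, worklistB]
        simp only [List.partition_eq_filter_filter]
        congr 1
        · -- cluster heads agree
          rw [c1, hsel1]
          simp only [PySem.Set.ofList_eq_foldl, List.foldl_cons, List.foldl_nil,
            List.foldl_map]
        · rw [IH (i + 1) _ (by omega) (by rw [c3, hlen1]), c2, hsel1]
          congr 1
          apply List.filter_congr
          intro x _
          by_cases hx : hamming items[i].2 x.2 ≤ thresh
          · simp [hx, not_lt.mpr hx]
          · simp [hx]
      · -- used[i] = true: skip
        have heq : outerA items thresh used i = outerA items thresh used (i + 1) := by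
          rw [outerA, dif_pos h, hgd, hu]
          simp
        have hsel : sel items used i = sel items used (i + 1) := by
          rw [sel_cons items used i h hlen]; simp [hu]
        rw [heq, hsel, IH (i + 1) used (by omega) hlen]
    · rw [sel_of_ge items used i (by omega), outerA, dif_neg h, worklistB]

theorem sel_replicate_false (items : List ((Int × Int) × List Int)) :
    sel items (List.replicate items.length false) 0 = items := by
  unfold sel
  induction items with
  | nil => rfl
  | cons x xs ih =>
    simp only [List.length_cons, List.replicate_succ, List.zip_cons_cons,
      List.drop_zero, List.filterMap_cons] at *
    simp only [if_neg (by simp : ¬ (false = true))] at *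
    rw [ih]

theorem bucket_eq (thresh : Int) (items : List ((Int × Int) × List Int)) :
    outerA items thresh (List.replicate items.length false) 0 =
      worklistB thresh items := by
  rw [outerA_eq_worklistB items thresh items.length 0
    (List.replicate items.length false) (by omega) (by simp),
    sel_replicate_false]

-- ===== VERDICT (by name: the statement is the Claim_ definition above) =====
theorem cluster_within_sc_spec : Claim_equal_cluster_within_sc := by
  intro sigs thresh _
  unfold Spec_cluster_within_sc cluster_within_sc cluster_within_sc_alt
  simp only [bucket_eq]
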